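-- pv_equiv track=rewrite | github.com/bcwb/bright-aeo-engine | backend/agents/orchestrator.py | _top_n_brands
-- ===== SOURCE A (Python) =====
-- def _top_n_brands(text: str, brand_map: dict[str, list[str]], n: int = 3) -> list[str]:
--     """Return up to n canonical brand names found in text, ordered by first appearance."""
--     text_lower = text.lower()
--     hits: list[tuple[int, str]] = []
--     for canonical, variants in brand_map.items():
--         for v in variants:
--             idx = text_lower.find(v.lower())
--             if idx != -1:
--                 hits.append((idx, canonical))
--                 break
--     hits.sort()
--     seen: list[str] = []
--     for _, brand in hits:
--         if brand not in seen:
--             seen.append(brand)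
--         if len(seen) >= n:
--             break
--     return seen
-- ===== SOURCE B (Python) =====
-- def _top_n_brands(text: str, brand_map: dict[str, list[str]], n: int = 3) -> list[str]:
--     """Return up to n canonical brand names found in text, ordered by first appearance.
--
--     Single left-to-right sweep of the text with a first-character index of the
--     patterns, recording each pattern's first occurrence, then per brand pick the
--     first-listed variant that occurred, sort hits by position and take the top n."""
--     tl = text.lower()
--     by_first: dict[str, list[str]] = {}
--     first: dict[str, int] = {}
--     for variants in brand_map.values():
--         for v in variants:
--             lv = v.lower()
--             if lv:
--                 by_first.setdefault(lv[0], []).append(lv)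
--             else:
--                 first[lv] = 0  # the empty pattern trivially occurs at position 0
--     for i, c in enumerate(tl):
--         for lv in by_first.get(c, []):
--             if lv not in first and tl.startswith(lv, i):
--                 first[lv] = i
--     hits: list[tuple[int, str]] = []
--     for canonical, variants in brand_map.items():
--         for v in variants:
--             lv = v.lower()
--             if lv in first:
--                 hits.append((first[lv], canonical))
--                 break
--     res: list[str] = []
--     for brand in dict.fromkeys(b for _, b in sorted(hits)):
--         res.append(brand)
--         if len(res) >= n:
--             break
--     return res
-- ===== Notes on version B (the rewrite author's own statement) =====
-- stated objective: alternative
-- what changed: Instead of calling text.find() once per variant (each a full scan of the text), B makes a single left-to-right sweep over the text, dispatching at each position through a first-character index of the lowered patterns to record each pattern's first occurrence in one dict (the empty pattern trivially occurs at position 0), then picks per brand the first-listed variant found, sorts hits by (position, brand) and takes the top n via ordered dedup.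
import Mathlib
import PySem

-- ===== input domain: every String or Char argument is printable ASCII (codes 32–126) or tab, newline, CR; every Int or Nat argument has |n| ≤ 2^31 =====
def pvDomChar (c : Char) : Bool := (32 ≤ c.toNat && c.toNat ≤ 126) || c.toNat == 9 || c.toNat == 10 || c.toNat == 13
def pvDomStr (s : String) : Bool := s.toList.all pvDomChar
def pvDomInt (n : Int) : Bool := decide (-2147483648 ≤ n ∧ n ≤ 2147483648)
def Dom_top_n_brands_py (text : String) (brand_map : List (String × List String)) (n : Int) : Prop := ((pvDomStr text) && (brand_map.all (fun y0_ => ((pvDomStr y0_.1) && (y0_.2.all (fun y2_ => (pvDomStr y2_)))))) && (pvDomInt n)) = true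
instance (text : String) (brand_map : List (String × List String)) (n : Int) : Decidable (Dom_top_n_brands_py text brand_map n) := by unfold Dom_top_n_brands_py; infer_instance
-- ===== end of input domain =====

-- B replaces A's one-full-text .find() per variant by a single left-to-right sweep of the
-- text with a first-character index of the patterns (objective: alternative traversal).

-- ===== PORT A =====
-- A's inner 'for v in variants: idx = text_lower.find(v.lower()); if idx != -1: append; break'
def aFindHit (tl canonical : String) : List String → Option (Int × String)
  | [] => none
  | v :: rest =>
    let idx := PySem.Str.find tl (PySem.Str.lower v)
    if idx ≠ -1 then some (idx, canonical) else aFindHit tl canonical rest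

-- A's final 'for _, brand in hits: …' loop with its mid-loop break
def aSeenLoop (n : Int) : List (Int × String) → List String → List String
  | [], seen => seen
  | hit :: rest, seen =>
    let seen' := if seen.contains hit.2 then seen else seen ++ [hit.2]
    if n ≤ (seen'.length : Int) then seen' else aSeenLoop n rest seen'

def top_n_brands_py (text : String) (brand_map : List (String × List String)) (n : Int) : List String :=
  let text_lower := PySem.Str.lower text
  let hits := brand_map.foldl (fun hits cv =>
    match aFindHit text_lower cv.1 cv.2 with
    | some p => hits ++ [p]
    | none => hits) []
  aSeenLoop n (PySem.List.sorted2 hits (fun p => p.1) (fun p => p.2) false) []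

-- ===== PORT B =====
-- B's grouping loop: lowered non-empty patterns grouped by their first character
-- (Python keys the dict by the 1-character string lv[0]; ported as the Char itself);
-- the empty pattern goes straight into 'first' at position 0
def bIndex (brand_map : List (String × List String)) :
    PySem.Dict Char (List String) × PySem.Dict String Int :=
  brand_map.foldl (fun acc cv =>
    cv.2.foldl (fun acc v =>
      match (PySem.Str.lower v).toList with
      | [] => (acc.1, acc.2.insert "" 0)
      | c :: _ => (acc.1.modify c [] (fun l => l ++ [PySem.Str.lower v]), acc.2)) acc)
    (PySem.Dict.empty, PySem.Dict.empty)

-- B's sweep 'for i, c in enumerate(tl): for lv in by_first.get(c, []): …'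
-- (tl.startswith(lv, i) is ported as startswith on drop i — exact here since 0 ≤ i ≤ len(tl))
def bSweep (cs : List Char) (byF : PySem.Dict Char (List String))
    (first0 : PySem.Dict String Int) : PySem.Dict String Int :=
  (PySem.List.enumerate cs 0).foldl (fun first ic =>
    (byF.getD ic.2 []).foldl (fun first lv =>
      if first.contains lv = false && PySem.Chars.startswith (cs.drop ic.1.toNat) lv.toList
      then first.insert lv ic.1 else first) first) first0

-- B's inner 'for v in variants: … if lv in first: append; break'
def bFindHit (first : PySem.Dict String Int) (canonical : String) : List String → Option (Int × String)
  | [] => none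
  | v :: rest =>
    match first.get? (PySem.Str.lower v) with
    | some i => some (i, canonical)
    | none => bFindHit first canonical rest

-- B's final 'for brand in dict.fromkeys(…): res.append(brand); if len(res) >= n: break'
def bTake (n : Int) : List String → List String → List String
  | [], res => res
  | b :: rest, res =>
    let res' := res ++ [b]
    if n ≤ (res'.length : Int) then res' else bTake n rest res'

def top_n_brands_py_alt (text : String) (brand_map : List (String × List String)) (n : Int) : List String :=
  let tl := PySem.Str.lower text
  let idx := bIndex brand_map
  let first := bSweep tl.toList idx.1 idx.2
  let hits := brand_map.foldl (fun hits cv =>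
    match bFindHit first cv.1 cv.2 with
    | some p => hits ++ [p]
    | none => hits) []
  bTake n
    (PySem.List.dedup
      ((PySem.List.sorted2 hits (fun p => p.1) (fun p => p.2) false).map (fun p => p.2))) []

-- ===== PRECONDITION & SPEC =====
def Spec_top_n_brands_py (text : String) (brand_map : List (String × List String)) (n : Int) (out : List String) : Prop := out = top_n_brands_py_alt text brand_map n
instance (text : String) (brand_map : List (String × List String)) (n : Int) (out : List String) : Decidable (Spec_top_n_brands_py text brand_map n out) := by unfold Spec_top_n_brands_py; infer_instance

-- ===== CLAIM (what is proved, stated in full; the proofs are below) =====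
def Claim_equal_top_n_brands_py : Prop := ∀ (text : String) (brand_map : List (String × List String)) (n : Int), Dom_top_n_brands_py text brand_map n → Spec_top_n_brands_py text brand_map n (top_n_brands_py text brand_map n)

-- ===== LEMMAS AND PROOFS =====

-- the two components of bIndex's fold step, separated
def bF (d : PySem.Dict Char (List String)) (v : String) : PySem.Dict Char (List String) :=
  match (PySem.Str.lower v).toList with
  | [] => d
  | c :: _ => d.modify c [] (fun l => l ++ [PySem.Str.lower v])

def bG (e : PySem.Dict String Int) (v : String) : PySem.Dict String Int :=
  match (PySem.Str.lower v).toList with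
  | [] => e.insert "" 0
  | _ :: _ => e

def bByFirst (brand_map : List (String × List String)) : PySem.Dict Char (List String) :=
  brand_map.foldl (fun d cv => cv.2.foldl bF d) PySem.Dict.empty

def bFirst0 (brand_map : List (String × List String)) : PySem.Dict String Int :=
  brand_map.foldl (fun e cv => cv.2.foldl bG e) PySem.Dict.empty

theorem foldl_pair {α β γ : Type} (F : α → γ → α) (G : β → γ → β) (l : List γ) :
    ∀ (a : α) (b : β), l.foldl (fun p x => (F p.1 x, G p.2 x)) (a, b) = (l.foldl F a, l.foldl G b) := by
  induction l with
  | nil => intro a b; rfl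
  | cons x r ih => intro a b; simp only [List.foldl_cons]; exact ih (F a x) (G b x)

theorem bIndex_eq (bm : List (String × List String)) :
    bIndex bm = (bByFirst bm, bFirst0 bm) := by
  unfold bIndex bByFirst bFirst0
  have hstep : (fun (acc : PySem.Dict Char (List String) × PySem.Dict String Int) (v : String) =>
      match (PySem.Str.lower v).toList with
      | [] => (acc.1, acc.2.insert "" 0)
      | c :: _ => (acc.1.modify c [] (fun l => l ++ [PySem.Str.lower v]), acc.2))
    = fun acc v => (bF acc.1 v, bG acc.2 v) := by
    funext acc v
    rcases h : (PySem.Str.lower v).toList with _ | ⟨c, t⟩ <;> simp [bF, bG, h]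
  rw [hstep]
  have houter : (fun (acc : PySem.Dict Char (List String) × PySem.Dict String Int)
        (cv : String × List String) =>
      cv.2.foldl (fun acc v => (bF acc.1 v, bG acc.2 v)) acc)
    = fun acc cv => (cv.2.foldl bF acc.1, cv.2.foldl bG acc.2) := by
    funext acc cv
    rw [show acc = (acc.1, acc.2) from rfl, foldl_pair]
  rw [houter]
  exact foldl_pair (fun d (cv : String × List String) => cv.2.foldl bF d)
    (fun e (cv : String × List String) => cv.2.foldl bG e) bm _ _

-- all lowered variants, in A's traversal order
def allLow (brand_map : List (String × List String)) : List String :=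
  brand_map.flatMap (fun cv => cv.2.map PySem.Str.lower)

-- the (first character, lowered variant) pair of a non-empty variant
def pairOf (v : String) : Option (Char × String) :=
  match (PySem.Str.lower v).toList with
  | [] => none
  | c :: _ => some (c, PySem.Str.lower v)

def pairs (brand_map : List (String × List String)) : List (Char × String) :=
  brand_map.flatMap (fun cv => cv.2.filterMap pairOf)

-- what the sweep's dict holds for w after the first i positions
def targetAt (cs : List Char) (i : Nat) (w : String) : Option Int :=
  if 0 ≤ PySem.Chars.find cs w.toList ∧ PySem.Chars.find cs w.toList < (i : Int)
  then some (PySem.Chars.find cs w.toList) else none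

-- ordered first occurrences of xs that are not already in seen
def relD (seen : List String) : List String → List String
  | [] => []
  | b :: r => if seen.contains b then relD seen r else b :: relD (seen ++ [b]) r

theorem byFirst_eq (bm : List (String × List String)) :
    bByFirst bm = (pairs bm).foldl (fun d p => d.modify p.1 [] (fun l => l ++ [p.2])) PySem.Dict.empty := by
  unfold bByFirst pairs
  rw [List.foldl_flatMap]
  refine PySem.List.foldl_congr_mem _ _ _ _ ?_
  intro acc cv _
  rw [List.foldl_filterMap]
  refine PySem.List.foldl_congr_mem _ _ _ _ ?_
  intro d v _
  rcases h : (PySem.Str.lower v).toList with _ | ⟨c, t⟩ <;> simp [bF, pairOf, h]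

theorem bucket_spec (bm : List (String × List String)) (c : Char) :
    (bByFirst bm).getD c [] = ((pairs bm).filter (fun p => p.1 == c)).map (fun p => p.2) := by
  rw [byFirst_eq, PySem.Dict.getD_foldl_modify_append]
  simp [PySem.Dict.getD, PySem.Dict.get?, PySem.Dict.empty]

theorem pairOf_eq_some (v : String) (c : Char) (w : String) :
    pairOf v = some (c, w) ↔ PySem.Str.lower v = w ∧ w.toList.head? = some c := by
  rcases h : (PySem.Str.lower v).toList with _ | ⟨c', t⟩
  · simp only [pairOf, h]
    constructor
    · intro hc; cases hc
    · rintro ⟨hv, hh⟩; rw [← hv] at hh; rw [h] at hh; cases hh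
  · simp only [pairOf, h, Option.some_inj, Prod.mk.injEq]
    constructor
    · rintro ⟨hc, hv⟩; refine ⟨hv, ?_⟩; rw [← hv, h]; simp [hc]
    · rintro ⟨hv, hh⟩; rw [← hv, h] at hh; simp at hh; exact ⟨hh.symm ▸ rfl, hv⟩

theorem mem_bucket (bm : List (String × List String)) (c : Char) (w : String) :
    w ∈ (bByFirst bm).getD c [] ↔ w ∈ allLow bm ∧ w.toList.head? = some c := by
  rw [bucket_spec]
  simp only [List.mem_map, List.mem_filter, pairs, List.mem_flatMap, List.mem_filterMap, allLow]
  constructor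
  · rintro ⟨⟨c', w'⟩, ⟨⟨cv, hcv, v, hv, hp⟩, hc⟩, rfl⟩
    have hc' : c' = c := by simpa using hc
    subst hc'
    rcases (pairOf_eq_some v c' w').1 hp with ⟨hlv, hh⟩
    exact ⟨⟨cv, hcv, ⟨v, hv, hlv⟩⟩, hh⟩
  · rintro ⟨⟨cv, hcv, v, hv, hlv⟩, hh⟩
    exact ⟨(c, w), ⟨⟨cv, hcv, v, hv, (pairOf_eq_some v c w).2 ⟨hlv, hh⟩⟩, by simp⟩, rfl⟩

theorem bG_get? (l : List String) : ∀ (e : PySem.Dict String Int) (w : String),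
    (l.foldl bG e).get? w
    = if w = "" ∧ l.any (fun v => (PySem.Str.lower v).toList.isEmpty) = true
      then some 0 else e.get? w := by
  induction l with
  | nil => intro e w; simp
  | cons v r ih =>
    intro e w
    rw [List.foldl_cons, ih]
    rcases h : (PySem.Str.lower v).toList with _ | ⟨c, t⟩
    · have hany : (v :: r).any (fun v => (PySem.Str.lower v).toList.isEmpty) = true := by
        rw [List.any_cons, h]
        simp
      rw [show bG e v = e.insert "" 0 from by unfold bG; rw [h]]
      by_cases hw : w = ""
      · subst hw
        by_cases hr : (r.any (fun v => (PySem.Str.lower v).toList.isEmpty)) = true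
        · rw [if_pos ⟨rfl, hr⟩, if_pos ⟨rfl, hany⟩]
        · rw [if_neg (fun hc => hr hc.2), if_pos ⟨rfl, hany⟩,
            PySem.Dict.get?_insert, if_pos rfl]
      · rw [if_neg (fun hc => hw hc.1), if_neg (fun hc => hw hc.1),
          PySem.Dict.get?_insert, if_neg hw]
    · rw [show bG e v = e from by unfold bG; rw [h]]
      have hany2 : (v :: r).any (fun v => (PySem.Str.lower v).toList.isEmpty)
          = r.any (fun v => (PySem.Str.lower v).toList.isEmpty) := by
        rw [List.any_cons, h]
        simp
      rw [hany2]

theorem first0_aux (l : List (String × List String)) : ∀ (e : PySem.Dict String Int) (w : String),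
    (l.foldl (fun e cv => cv.2.foldl bG e) e).get? w
    = if w = "" ∧ l.any (fun cv => cv.2.any (fun v => (PySem.Str.lower v).toList.isEmpty)) = true
      then some 0 else e.get? w := by
  induction l with
  | nil => intro e w; simp
  | cons cv r ih =>
    intro e w
    rw [List.foldl_cons, ih, bG_get?, List.any_cons]
    by_cases hw : w = ""
    · subst hw
      by_cases h2 : (r.any (fun cv => cv.2.any (fun v => (PySem.Str.lower v).toList.isEmpty))) = true
      · rw [if_pos ⟨rfl, h2⟩, if_pos ⟨rfl, by rw [Bool.or_eq_true]; exact Or.inr h2⟩]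
      · rw [if_neg (fun hc => h2 hc.2)]
        by_cases h1 : (cv.2.any (fun v => (PySem.Str.lower v).toList.isEmpty)) = true
        · rw [if_pos ⟨rfl, h1⟩, if_pos ⟨rfl, by rw [Bool.or_eq_true]; exact Or.inl h1⟩]
        · rw [if_neg (fun hc => h1 hc.2), if_neg (fun hc => by
            have h := hc.2
            rw [Bool.or_eq_true] at h
            rcases h with h | h
            · exact h1 h
            · exact h2 h)]
    · rw [if_neg (fun hc => hw hc.1), if_neg (fun hc => hw hc.1), if_neg (fun hc => hw hc.1)]

theorem first0_get? (bm : List (String × List String)) (w : String) :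
    (bFirst0 bm).get? w
    = if w = "" ∧ bm.any (fun cv => cv.2.any (fun v => (PySem.Str.lower v).toList.isEmpty)) = true
      then some 0 else none := by
  unfold bFirst0
  rw [first0_aux]
  simp [PySem.Dict.get?, PySem.Dict.empty]

theorem sweep_inner (cs : List Char) (i : Int) (l : List String) (d : PySem.Dict String Int)
    (w : String) :
    (l.foldl (fun first lv =>
      if first.contains lv = false && PySem.Chars.startswith (cs.drop i.toNat) lv.toList
      then first.insert lv i else first) d).get? w
    = if w ∈ l then
        (if (d.get? w).isNone && PySem.Chars.startswith (cs.drop i.toNat) w.toList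
         then some i else d.get? w)
      else d.get? w := by
  induction l generalizing d with
  | nil => simp
  | cons x rest ih =>
    simp only [List.foldl_cons]
    rw [ih]
    have hkey : (if d.contains x = false && PySem.Chars.startswith (cs.drop i.toNat) x.toList
          then d.insert x i else d).get? w
        = if w = x then (if (d.get? w).isNone && PySem.Chars.startswith (cs.drop i.toNat) w.toList
            then some i else d.get? w) else d.get? w := by
      by_cases hcond : (d.contains x = false && PySem.Chars.startswith (cs.drop i.toNat) x.toList) = true
      · rw [if_pos hcond, PySem.Dict.get?_insert]
        rcases Bool.and_eq_true_iff.1 hcond with ⟨hcf, hsw⟩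
        by_cases hwx : w = x
        · subst hwx
          rw [if_pos rfl, if_pos rfl]
          rw [PySem.Dict.contains_eq_isSome_get?] at hcf
          have hnone : d.get? w = none := by
            cases hgx : d.get? w with
            | none => rfl
            | some y => rw [hgx] at hcf; simp at hcf
          rw [if_pos (by rw [hnone]; simpa using hsw)]
        · rw [if_neg hwx, if_neg hwx]
      · rw [if_neg hcond]
        by_cases hwx : w = x
        · subst hwx
          rw [if_pos rfl]
          have : ¬ ((d.get? w).isNone && PySem.Chars.startswith (cs.drop i.toNat) w.toList) = true := by
            intro hh
            rcases Bool.and_eq_true_iff.1 hh with ⟨h1, h2⟩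
            apply hcond
            rw [Bool.and_eq_true_iff]
            refine ⟨?_, h2⟩
            rw [PySem.Dict.contains_eq_isSome_get?]
            simp only [Option.isNone_iff_eq_none] at h1
            simp [h1]
          rw [if_neg this]
        · rw [if_neg hwx]
    rw [hkey]
    by_cases hwx : w = x
    · subst hwx
      by_cases hmem : w ∈ rest
      · rw [if_pos rfl, if_pos hmem, if_pos (List.mem_cons_self)]
        by_cases hstep : ((d.get? w).isNone && PySem.Chars.startswith (cs.drop i.toNat) w.toList) = true
        · rw [if_pos hstep]
          rw [if_neg (by simp)]
        · rw [if_neg hstep, if_neg hstep]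
      · rw [if_pos rfl, if_neg hmem, if_pos (List.mem_cons_self)]
    · rw [if_neg hwx]
      by_cases hmem : w ∈ rest
      · rw [if_pos hmem, if_pos (List.mem_cons_of_mem x hmem)]
      · rw [if_neg hmem, if_neg (by simp [hwx, hmem])]

theorem prefix_drop_find_le (cs : List Char) (w : List Char) (k : Nat) (h : w <+: cs.drop k) :
    0 ≤ PySem.Chars.find cs w ∧ PySem.Chars.find cs w ≤ (k : Int) := by
  have hinf : w <:+: cs := h.isInfix.trans (List.drop_suffix k cs).isInfix
  have h0 : 0 ≤ PySem.Chars.find cs w := (PySem.Chars.find_nonneg_iff cs w).2 hinf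
  refine ⟨h0, ?_⟩
  by_contra hlt
  have hk : k < (PySem.Chars.find cs w).toNat := by
    have := Int.toNat_of_nonneg h0; omega
  exact (PySem.Chars.find_spec h0).2 k hk h

theorem find_lt_length_of_nonempty (cs : List Char) (w : List Char) (hw : w ≠ [])
    (h0 : 0 ≤ PySem.Chars.find cs w) : PySem.Chars.find cs w < (cs.length : Int) := by
  have hp := (PySem.Chars.find_spec h0).1
  have hne : cs.drop (PySem.Chars.find cs w).toNat ≠ [] := by
    intro he; rw [he] at hp; exact hw (List.prefix_nil.mp hp)
  rw [ne_eq, List.drop_eq_nil_iff] at hne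
  have := Int.toNat_of_nonneg h0; omega

theorem sweep_pos_step (bm : List (String × List String)) (cs : List Char) (k : Nat)
    (c : Char) (rest : List Char) (hd : cs.drop k = c :: rest) (d : PySem.Dict String Int)
    (hI : ∀ w, w ∈ allLow bm → w.toList ≠ [] → d.get? w = targetAt cs k w)
    (w : String) (hw : w ∈ allLow bm) (hne : w.toList ≠ []) :
    (((bByFirst bm).getD c []).foldl (fun first lv =>
      if first.contains lv = false && PySem.Chars.startswith (cs.drop (k : Int).toNat) lv.toList
      then first.insert lv (k : Int) else first) d).get? w = targetAt cs (k + 1) w := by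
  rw [sweep_inner]
  have htn : ((k : Int)).toNat = k := Int.toNat_natCast k
  rw [hI w hw hne]
  by_cases h1 : 0 ≤ PySem.Chars.find cs w.toList ∧ PySem.Chars.find cs w.toList < (k : Int)
  · have ht : targetAt cs k w = some (PySem.Chars.find cs w.toList) := by
      unfold targetAt; rw [if_pos h1]
    have ht' : targetAt cs (k+1) w = some (PySem.Chars.find cs w.toList) := by
      unfold targetAt; rw [if_pos ⟨h1.1, by push_cast; omega⟩]
    rw [ht, ht']
    by_cases hmem : w ∈ (bByFirst bm).getD c [] <;> simp [hmem]
  · have ht : targetAt cs k w = none := by unfold targetAt; rw [if_neg h1]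
    rw [ht]
    by_cases hsw : w.toList <+: cs.drop k
    · have hle := prefix_drop_find_le cs w.toList k hsw
      have hfk : PySem.Chars.find cs w.toList = (k : Int) := by omega
      have hmem : w ∈ (bByFirst bm).getD c [] := by
        refine (mem_bucket bm c w).2 ⟨hw, ?_⟩
        rcases hx : w.toList with _ | ⟨wc, wt⟩
        · exact absurd hx hne
        · rw [hx, hd] at hsw
          rcases (List.cons_prefix_cons).1 hsw with ⟨hcc, _⟩
          simp [hcc]
      have hsw' : PySem.Chars.startswith (cs.drop k) w.toList = true := by
        rw [PySem.Chars.startswith_iff]; exact hsw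
      rw [if_pos hmem]
      rw [if_pos (by simp [htn, hsw'])]
      unfold targetAt
      rw [if_pos ⟨by omega, by push_cast; omega⟩]
      rw [hfk]
    · have hnsw : PySem.Chars.startswith (cs.drop k) w.toList = false := by
        rw [Bool.eq_false_iff]
        intro hTrue
        exact hsw ((PySem.Chars.startswith_iff _ _).1 hTrue)
      have ht' : targetAt cs (k+1) w = none := by
        unfold targetAt
        rw [if_neg]
        rintro ⟨ha, hb⟩
        have hk : PySem.Chars.find cs w.toList = (k : Int) := by push_cast at hb; omega
        have hp := (PySem.Chars.find_spec ha).1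
        rw [hk, htn] at hp
        exact hsw hp
      rw [ht']
      by_cases hmem : w ∈ (bByFirst bm).getD c [] <;> simp [hmem, htn, hnsw]

theorem sweep_inv (bm : List (String × List String)) (cs : List Char) :
    ∀ (rest : List Char) (k : Nat) (d : PySem.Dict String Int), cs.drop k = rest →
    (∀ w, w ∈ allLow bm → w.toList ≠ [] → d.get? w = targetAt cs k w) →
    ∀ w, w ∈ allLow bm → w.toList ≠ [] →
    ((PySem.List.enumerate rest (k : Int)).foldl (fun first ic =>
      ((bByFirst bm).getD ic.2 []).foldl (fun first lv =>
        if first.contains lv = false && PySem.Chars.startswith (cs.drop ic.1.toNat) lv.toList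
        then first.insert lv ic.1 else first) first) d).get? w = targetAt cs cs.length w := by
  intro rest
  induction rest with
  | nil =>
    intro k d hdrop hI w hw hne
    rw [PySem.List.enumerate_nil, List.foldl_nil, hI w hw hne]
    have hk : cs.length ≤ k := List.drop_eq_nil_iff.mp hdrop
    unfold targetAt
    by_cases h1 : 0 ≤ PySem.Chars.find cs w.toList ∧ PySem.Chars.find cs w.toList < (k : Int)
    · rw [if_pos h1, if_pos ⟨h1.1, find_lt_length_of_nonempty cs w.toList hne h1.1⟩]
    · rw [if_neg h1, if_neg ?_]
      rintro ⟨ha, hb⟩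
      have : (cs.length : Int) ≤ (k : Int) := by exact_mod_cast hk
      exact h1 ⟨ha, by omega⟩
  | cons c rest' ih =>
    intro k d hdrop hI w hw hne
    rw [PySem.List.enumerate_cons, List.foldl_cons]
    have hd' : cs.drop (k+1) = rest' := by
      rw [List.drop_add_one_eq_tail_drop, hdrop, List.tail_cons]
    have hcast : (k : Int) + 1 = ((k + 1 : Nat) : Int) := by push_cast; ring
    rw [hcast]
    exact ih (k+1) _ hd' (fun w hw hne => sweep_pos_step bm cs k c rest' hdrop d hI w hw hne) w hw hne

theorem sweep_preserve_empty (bm : List (String × List String)) (cs : List Char)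
    (l : List (Int × Char)) : ∀ (d : PySem.Dict String Int),
    (l.foldl (fun first ic =>
      ((bByFirst bm).getD ic.2 []).foldl (fun first lv =>
        if first.contains lv = false && PySem.Chars.startswith (cs.drop ic.1.toNat) lv.toList
        then first.insert lv ic.1 else first) first) d).get? "" = d.get? "" := by
  induction l with
  | nil => intro d; simp
  | cons ic rest ih =>
    intro d
    rw [List.foldl_cons, ih, sweep_inner]
    have hnm : ("" : String) ∉ (bByFirst bm).getD ic.2 [] := by
      intro hmem
      have := ((mem_bucket bm ic.2 "").1 hmem).2
      simp at this
    rw [if_neg hnm]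

theorem anyEmpty_iff (bm : List (String × List String)) :
    (bm.any (fun cv => cv.2.any (fun v => (PySem.Str.lower v).toList.isEmpty)) = true) ↔ "" ∈ allLow bm := by
  simp only [List.any_eq_true, allLow, List.mem_flatMap, List.mem_map, List.isEmpty_iff,
    String.toList_eq_nil_iff]

theorem first_dict_spec (bm : List (String × List String)) (cs : List Char)
    (v : String) (hv : v ∈ allLow bm) :
    (bSweep cs (bByFirst bm) (bFirst0 bm)).get? v
    = if PySem.Chars.find cs v.toList = -1 then none else some (PySem.Chars.find cs v.toList) := by
  by_cases hv0 : v = ""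
  · subst hv0
    unfold bSweep
    rw [sweep_preserve_empty, first0_get?]
    rw [if_pos ⟨rfl, (anyEmpty_iff bm).2 hv⟩]
    have hfind : PySem.Chars.find cs ("" : String).toList = 0 := by
      rw [show ("" : String).toList = [] from rfl, PySem.Chars.find_nil]
    rw [hfind]
    norm_num
  · have hne : v.toList ≠ [] := fun h => hv0 (String.toList_eq_nil_iff.mp h)
    unfold bSweep
    have h0 : ∀ w, w ∈ allLow bm → w.toList ≠ [] →
        (bFirst0 bm).get? w = targetAt cs 0 w := by
      intro w _ hwne
      have ht : targetAt cs 0 w = none := by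
        unfold targetAt; rw [if_neg]; rintro ⟨ha, hb⟩; simp at hb; omega
      rw [ht, first0_get?, if_neg]
      rintro ⟨hw0, _⟩
      exact hwne (by rw [hw0]; rfl)
    have hmain := sweep_inv bm cs cs 0 _ (by simp) h0 v hv hne
    simp only [Nat.cast_zero] at hmain
    rw [hmain]
    unfold targetAt
    by_cases hfneg : PySem.Chars.find cs v.toList = -1
    · rw [if_neg (by rintro ⟨ha, _⟩; omega), if_pos hfneg]
    · have hge : 0 ≤ PySem.Chars.find cs v.toList := by
        have := PySem.Chars.neg_one_le_find cs v.toList; omega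
      rw [if_pos ⟨hge, find_lt_length_of_nonempty cs v.toList hne hge⟩, if_neg hfneg]

theorem findHit_eq (bm : List (String × List String)) (tl : String) (canonical : String)
    (vs : List String) (hvs : ∀ v ∈ vs, PySem.Str.lower v ∈ allLow bm) :
    bFindHit (bSweep tl.toList (bByFirst bm) (bFirst0 bm)) canonical vs
    = aFindHit tl canonical vs := by
  induction vs with
  | nil => rfl
  | cons v rest ih =>
    simp only [aFindHit, bFindHit]
    rw [first_dict_spec bm tl.toList (PySem.Str.lower v) (hvs v List.mem_cons_self)]
    rw [PySem.Str.find_eq]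
    simp only [PySem.Str.toList_lower]
    by_cases h : PySem.Chars.find tl.toList (PySem.Chars.lower v.toList) = -1
    · simp [h]
      exact ih (fun v hv => hvs v (List.mem_cons_of_mem _ hv))
    · simp [h]

theorem foldl_add_eq_relD (xs : List String) : ∀ seen : List String,
    xs.foldl PySem.Set.add seen = seen ++ relD seen xs := by
  induction xs with
  | nil => intro seen; simp [relD]
  | cons b r ih =>
    intro seen
    by_cases h : seen.contains b
    · have hm : b ∈ seen := by simpa using h
      simp [relD, hm, PySem.Set.add, PySem.Set.contains, ih]
    · have hm : b ∉ seen := by simpa using h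
      simp only [List.foldl_cons, relD, h, if_neg, Bool.false_eq_true, not_false_iff]
      rw [show PySem.Set.add seen b = seen ++ [b] by
        simp [PySem.Set.add, PySem.Set.contains, hm]]
      rw [ih]
      simp

theorem seenLoop_eq_take (n : Int) (l : List (Int × String)) : ∀ seen : List String,
    ((seen.length : Int) < n ∨ seen = []) →
    aSeenLoop n l seen = bTake n (relD seen (l.map (fun p => p.2))) seen := by
  induction l with
  | nil => intro seen _; simp [aSeenLoop, relD, bTake]
  | cons p rest ih =>
    intro seen hinv
    by_cases hb : seen.contains p.2
    · have hne : seen ≠ [] := by rintro rfl; simp at hb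
      have hlt : (seen.length : Int) < n := hinv.resolve_right hne
      simp only [aSeenLoop, List.map_cons, relD, hb, if_pos, if_neg (by omega : ¬ n ≤ (seen.length : Int))]
      exact ih seen (Or.inl hlt)
    · simp only [aSeenLoop, List.map_cons, relD, hb, Bool.false_eq_true, if_neg, not_false_iff]
      show (if n ≤ ((seen ++ [p.2]).length : Int) then seen ++ [p.2] else aSeenLoop n rest (seen ++ [p.2]))
        = bTake n (p.2 :: relD (seen ++ [p.2]) (rest.map (fun p => p.2))) seen
      show _ = (if n ≤ ((seen ++ [p.2]).length : Int) then seen ++ [p.2]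
          else bTake n (relD (seen ++ [p.2]) (rest.map (fun p => p.2))) (seen ++ [p.2]))
      by_cases hc : n ≤ ((seen ++ [p.2]).length : Int)
      · rw [if_pos hc, if_pos hc]
      · rw [if_neg hc, if_neg hc]
        exact ih (seen ++ [p.2]) (Or.inl (by simp at hc ⊢; omega))

-- ===== VERDICT (by name: the statement is the Claim_ definition above) =====
theorem top_n_brands_py_spec : Claim_equal_top_n_brands_py := by
  intro text bm n _
  unfold Spec_top_n_brands_py
  show top_n_brands_py text bm n = top_n_brands_py_alt text bm n
  simp only [top_n_brands_py, top_n_brands_py_alt, bIndex_eq]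
  have hhits : bm.foldl (fun hits cv =>
      match bFindHit (bSweep (PySem.Str.lower text).toList (bByFirst bm) (bFirst0 bm)) cv.1 cv.2 with
      | some p => hits ++ [p] | none => hits) []
    = bm.foldl (fun hits cv =>
      match aFindHit (PySem.Str.lower text) cv.1 cv.2 with
      | some p => hits ++ [p] | none => hits) [] := by
    refine PySem.List.foldl_congr_mem _ _ _ _ ?_
    intro acc cv hcv
    rw [findHit_eq bm (PySem.Str.lower text) cv.1 cv.2
      (fun v hv => List.mem_flatMap.2 ⟨cv, hcv, List.mem_map.2 ⟨v, hv, rfl⟩⟩)]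
  rw [hhits]
  rw [show ∀ (S : List String), PySem.List.dedup S = relD [] S from fun S => by
    have h := foldl_add_eq_relD S []
    simpa [PySem.List.dedup, PySem.Set.ofList, PySem.Set.empty] using h]
  exact seenLoop_eq_take n _ [] (Or.inr rfl)
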